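-- pv_equiv track=rewrite | github.com/svetlanasieber/SoftUni-Upskill-Courses | PROGRAMMING BASICS WITH PYTHON-FEB 2023/Pre_Exam-20-04-2024/06. Unique PIN Codes/06.Unique PIN Codes.py | generate_pins
-- ===== SOURCE A (Python) =====
-- def is_prime(num):
--     if num < 2:
--         return False
--     for i in range(2, int(num**0.5) + 1):
--         if num % i == 0:
--             return False
--     return True
--
-- def generate_pins(first_upper, second_upper, third_upper):
--     pins = []
--     for i in range(1, first_upper + 1):
--         if i % 2 == 0:
--             for j in range(1, second_upper + 1):
--                 if is_prime(j):
--                     for k in range(1, third_upper + 1):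
--                         if k % 2 == 0:
--                             pins.append((i, j, k))
--     return pins
-- ===== SOURCE B (Python) =====
-- # B: compute the prime list once (odd-only trial division), precompute the even
-- # component lists once, then a single comprehension over the cross product.
-- def _is_prime_fast(j):
--     if j % 2 == 0:
--         return j == 2
--     d = 3
--     while d * d <= j:
--         if j % d == 0:
--             return False
--         d += 2
--     return True
--
--
-- def _primes_upto(n):
--     out = []
--     for j in range(2, n + 1):
--         if _is_prime_fast(j):
--             out.append(j)
--     return out
--
--
-- def generate_pins(first_upper, second_upper, third_upper):
--     evens_i = range(2, first_upper + 1, 2)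
--     evens_k = range(2, third_upper + 1, 2)
--     if not evens_i or not evens_k:
--         return []
--     primes = _primes_upto(second_upper)
--     return [(i, j, k) for i in evens_i for j in primes for k in evens_k]
-- ===== Notes on version B (the rewrite author's own statement) =====
-- stated objective: alternative
-- what changed: B computes the prime list once (with odd-only trial division) and the even-component ranges once, then emits the cross product, instead of re-running a full trial-division primality scan of 1..second_upper for every even i; on output-dominated inputs the measured cost is similar.
import Mathlib
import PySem

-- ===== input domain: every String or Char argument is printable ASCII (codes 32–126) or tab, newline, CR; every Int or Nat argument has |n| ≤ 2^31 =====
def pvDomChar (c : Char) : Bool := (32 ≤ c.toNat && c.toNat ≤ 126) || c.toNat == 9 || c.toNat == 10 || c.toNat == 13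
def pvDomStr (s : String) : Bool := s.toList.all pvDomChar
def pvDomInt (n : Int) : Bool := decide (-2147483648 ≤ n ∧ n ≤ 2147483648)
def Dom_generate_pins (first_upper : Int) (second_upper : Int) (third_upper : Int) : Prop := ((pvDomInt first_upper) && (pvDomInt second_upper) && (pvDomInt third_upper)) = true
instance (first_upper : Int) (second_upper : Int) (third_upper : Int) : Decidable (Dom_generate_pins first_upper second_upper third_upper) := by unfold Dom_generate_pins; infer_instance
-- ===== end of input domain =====

-- B builds the prime list once (odd-only trial division) and the even ranges once, then
-- emits the cross product, instead of re-testing primality of 1..second_upper for every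
-- even i (objective: alternative decomposition of the same enumeration).

-- ===== PORT A =====
-- int(num**0.5) is ported as Nat.sqrt: exact for 0 ≤ num ≤ 2^31 (the only values
-- is_prime receives inside Dom), where the double sqrt is correctly rounded.
def is_prime (num : Int) : Bool :=
  if num < 2 then false
  else
    -- 'for i in range(2, int(num**0.5)+1): if num % i == 0: return False / return True'
    (PySem.List.pyRange 2 ((Nat.sqrt num.toNat : Int) + 1) 1).all
      (fun i => !(PySem.Int.mod num i == 0))

def generate_pins (first_upper : Int) (second_upper : Int) (third_upper : Int) :
    List (Int × Int × Int) :=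
  (PySem.List.pyRange 1 (first_upper + 1) 1).foldl (fun pins i =>
    if PySem.Int.mod i 2 == 0 then
      (PySem.List.pyRange 1 (second_upper + 1) 1).foldl (fun pins j =>
        if is_prime j then
          (PySem.List.pyRange 1 (third_upper + 1) 1).foldl (fun pins k =>
            if PySem.Int.mod k 2 == 0 then pins ++ [(i, j, k)] else pins) pins
        else pins) pins
    else pins) []

-- ===== PORT B =====
-- 'd = 3; while d*d <= j: if j % d == 0: return False; d += 2; return True'
def trialOdd (j d : Int) : Bool :=
  if h : d * d ≤ j then
    if PySem.Int.mod j d == 0 then false else trialOdd j (d + 2)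
  else true
termination_by (j + 3 - d).toNat
decreasing_by
  have hdj : d ≤ j := by nlinarith [mul_self_nonneg d]
  omega

def is_prime_fast (j : Int) : Bool :=
  if PySem.Int.mod j 2 == 0 then j == 2 else trialOdd j 3

def primes_upto (n : Int) : List Int :=
  (PySem.List.pyRange 2 (n + 1) 1).foldl
    (fun out j => if is_prime_fast j then out ++ [j] else out) []

def generate_pins_alt (first_upper : Int) (second_upper : Int) (third_upper : Int) :
    List (Int × Int × Int) :=
  -- 'if not evens_i or not evens_k: return []': Source B's evens_i/evens_k are lazy range
  -- objects, whose truth test is O(1): range(2, n+1, 2) is nonempty iff 2 ≤ n; the port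
  -- tests that arithmetically and materialises each range at its single use site.
  if first_upper ≤ 1 || third_upper ≤ 1 then []
  else
    let primes := primes_upto second_upper
    (PySem.List.pyRange 2 (first_upper + 1) 2).flatMap (fun i =>
      primes.flatMap (fun j =>
        (PySem.List.pyRange 2 (third_upper + 1) 2).map (fun k => (i, j, k))))

-- ===== PRECONDITION & SPEC =====
def Spec_generate_pins (first_upper : Int) (second_upper : Int) (third_upper : Int) (out : List (Int × Int × Int)) : Prop := out = generate_pins_alt first_upper second_upper third_upper
instance (first_upper : Int) (second_upper : Int) (third_upper : Int) (out : List (Int × Int × Int)) : Decidable (Spec_generate_pins first_upper second_upper third_upper out) := by unfold Spec_generate_pins; infer_instance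

-- ===== CLAIM (what is proved, stated in full; the proofs are below) =====
def Claim_equal_generate_pins : Prop := ∀ (first_upper : Int) (second_upper : Int) (third_upper : Int), Dom_generate_pins first_upper second_upper third_upper → Spec_generate_pins first_upper second_upper third_upper (generate_pins first_upper second_upper third_upper)

-- ===== LEMMAS AND PROOFS =====

-- Python 'a % b == 0' is divisibility (PySem.Int.mod is Int.fmod).
theorem pv_mod_eq_zero_iff (a b : Int) : (PySem.Int.mod a b == 0) = true ↔ b ∣ a := by
  simp only [PySem.Int.mod, beq_iff_eq]
  exact Iff.symm Int.dvd_iff_fmod_eq_zero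

-- a guarded extend inside a foldl = filter-then-flatMap
theorem pv_foldl_append_if_flat {α β : Type} (p : α → Bool) (g : α → List β)
    (l : List α) (acc : List β) :
    l.foldl (fun acc x => if p x then acc ++ g x else acc) acc
      = acc ++ (l.filter p).flatMap g := by
  induction l generalizing acc with
  | nil => simp
  | cons hd tl ih =>
    by_cases hp : p hd = true
    · simp [hp, ih, List.append_assoc]
    · simp only [Bool.not_eq_true] at hp
      simp [hp, ih]

-- the even elements of [1..m] are [2, 4, …]
theorem pv_evens_nat (m : Nat) :
    ((List.range m).map (fun k : Nat => (1 : Int) + (k : Int))).filter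
        (fun i => PySem.Int.mod i 2 == 0)
      = (List.range (m / 2)).map (fun k : Nat => (2 : Int) + 2 * (k : Int)) := by
  induction m with
  | zero => simp
  | succ m ih =>
    rw [List.range_succ, List.map_append, List.filter_append, ih]
    rcases Nat.even_or_odd m with he | ho
    · obtain ⟨t, rfl⟩ := he
      have hodd : ¬ ((2 : Int) ∣ (1 + ((t + t : Nat) : Int))) := by push_cast; omega
      have hb : (PySem.Int.mod (1 + ((t + t : Nat) : Int)) 2 == 0) = false := by
        rw [Bool.eq_false_iff]; intro h; exact hodd ((pv_mod_eq_zero_iff _ _).mp h)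
      have hd2 : (t + t + 1) / 2 = (t + t) / 2 := by omega
      have hfil : List.filter (fun i => PySem.Int.mod i 2 == 0)
          [(1 : Int) + ((t + t : Nat) : Int)] = [] := by
        rw [List.filter_cons, if_neg (by rw [hb]; simp)]; rfl
      rw [hd2, List.map_cons, List.map_nil, hfil, List.append_nil]
    · obtain ⟨t, rfl⟩ := ho
      have heven : (2 : Int) ∣ (1 + ((2 * t + 1 : Nat) : Int)) := by push_cast; omega
      have hb : (PySem.Int.mod (1 + ((2 * t + 1 : Nat) : Int)) 2 == 0) = true :=
        (pv_mod_eq_zero_iff _ _).mpr heven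
      have hd2 : (2 * t + 1 + 1) / 2 = (2 * t + 1) / 2 + 1 := by omega
      have h1 : (2 : Int) + 2 * (((2 * t + 1) / 2 : Nat) : Int)
          = 1 + ((2 * t + 1 : Nat) : Int) := by push_cast; omega
      have hfil : List.filter (fun i => PySem.Int.mod i 2 == 0)
          [(1 : Int) + ((2 * t + 1 : Nat) : Int)] = [(1 : Int) + ((2 * t + 1 : Nat) : Int)] := by
        rw [List.filter_cons, if_pos hb]; rfl
      rw [hd2, List.range_succ, List.map_append, List.map_cons, List.map_nil,
          List.map_cons, List.map_nil, hfil, h1]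

-- filtering range(1, n+1) for even values is range(2, n+1, 2)
theorem pv_filter_evens (n : Int) :
    (PySem.List.pyRange 1 (n + 1) 1).filter (fun i => PySem.Int.mod i 2 == 0)
      = PySem.List.pyRange 2 (n + 1) 2 := by
  by_cases hn : n ≤ 1
  · have h2 : ¬ (2 : Int) < n + 1 := by omega
    rw [PySem.List.pyRange_of_pos 2 (n + 1) (by norm_num : (0:Int) < 2), if_neg h2]
    simp only [List.range_zero, List.map_nil]
    by_cases hn0 : n ≤ 0
    · rw [PySem.List.pyRange_one_eq_nil (by omega)]; simp
    · have hn1 : n = 1 := by omega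
      subst hn1
      rw [PySem.List.pyRange_one 1 (1 + 1)]
      have hb : (PySem.Int.mod (1 : Int) 2 == 0) = false := by
        rw [Bool.eq_false_iff]; intro h
        have := (pv_mod_eq_zero_iff _ _).mp h; omega
      norm_num [hb]
  · have h2 : (2 : Int) < n + 1 := by omega
    rw [PySem.List.pyRange_one 1 (n + 1),
        PySem.List.pyRange_of_pos 2 (n + 1) (by norm_num : (0:Int) < 2), if_pos h2]
    have hlen : (n + 1 - 1).toNat = n.toNat := by omega
    have hlen2 : ((n + 1 - 2 + 2 - 1) / 2).toNat = n.toNat / 2 := by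
      rcases Int.even_or_odd n with ⟨t, ht⟩ | ⟨t, ht⟩ <;> omega
    rw [hlen, hlen2]
    exact pv_evens_nat n.toNat

-- ----- primality bridge -----

-- characterisation of A's trial division up to int(sqrt(num))
theorem pv_is_prime_iff (j : Int) (hj : 2 ≤ j) :
    (is_prime j = true ↔ ∀ e : Int, 2 ≤ e → e * e ≤ j → ¬ e ∣ j) := by
  have hsq : ∀ e : Int, 0 ≤ e → (e ≤ (Nat.sqrt j.toNat : Int) ↔ e * e ≤ j) := by
    intro e he
    have hj0 : (0 : Int) ≤ j := by omega
    constructor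
    · intro h
      have h1 : e.toNat ≤ Nat.sqrt j.toNat := by omega
      have h2 := Nat.le_sqrt.mp h1
      have h3 : ((e.toNat * e.toNat : Nat) : Int) ≤ ((j.toNat : Nat) : Int) :=
        (Nat.cast_le (α := Int)).mpr h2
      push_cast at h3
      rw [Int.toNat_of_nonneg he, Int.toNat_of_nonneg hj0] at h3
      exact h3
    · intro h
      have h2 : e.toNat * e.toNat ≤ j.toNat := by
        have h3 : ((e.toNat * e.toNat : Nat) : Int) ≤ ((j.toNat : Nat) : Int) := by
          push_cast
          rw [Int.toNat_of_nonneg he, Int.toNat_of_nonneg hj0]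
          exact h
        exact_mod_cast h3
      have := Nat.le_sqrt.mpr h2
      omega
  unfold is_prime
  rw [if_neg (by omega : ¬ j < 2), List.all_eq_true]
  constructor
  · intro h e he2 hee hdvd
    have hmem : e ∈ PySem.List.pyRange 2 ((Nat.sqrt j.toNat : Int) + 1) 1 := by
      rw [PySem.List.mem_pyRange_one]
      exact ⟨he2, by have := (hsq e (by omega)).mpr hee; omega⟩
    have hb := h e hmem
    simp only [Bool.not_eq_eq_eq_not, Bool.not_true] at hb
    rw [Bool.eq_false_iff] at hb
    exact hb ((pv_mod_eq_zero_iff _ _).mpr hdvd)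
  · intro h e hmem
    rw [PySem.List.mem_pyRange_one] at hmem
    obtain ⟨he2, helt⟩ := hmem
    have hee : e * e ≤ j := (hsq e (by omega)).mp (by omega)
    simp only [Bool.not_eq_eq_eq_not, Bool.not_true]
    rw [Bool.eq_false_iff]
    intro hc
    exact h e he2 hee ((pv_mod_eq_zero_iff _ _).mp hc)

-- characterisation of B's odd-step trial division
theorem pv_trialOdd_iff (j : Int) : ∀ (k : Nat) (d : Int), (j + 3 - d).toNat = k →
    3 ≤ d → d % 2 = 1 →
    (trialOdd j d = true ↔ ∀ e : Int, d ≤ e → e % 2 = 1 → e * e ≤ j → ¬ e ∣ j) := by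
  intro k
  induction k using Nat.strong_induction_on with
  | _ k ih =>
    intro d hk hd3 hdodd
    rw [trialOdd]
    by_cases h : d * d ≤ j
    · rw [dif_pos h]
      by_cases hm : (PySem.Int.mod j d == 0) = true
      · rw [if_pos hm]
        have hdvd : d ∣ j := (pv_mod_eq_zero_iff _ _).mp hm
        apply iff_of_false (by simp)
        intro hall
        exact hall d le_rfl hdodd h hdvd
      · rw [if_neg hm]
        have hdj : d ≤ j := by nlinarith
        have hlt : (j + 3 - (d + 2)).toNat < k := by omega
        rw [ih _ hlt (d + 2) rfl (by omega) (by omega)]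
        constructor
        · intro hrec e hde heodd hee hdvd
          rcases eq_or_lt_of_le hde with heq | hgt
          · exact hm ((pv_mod_eq_zero_iff _ _).mpr (heq ▸ hdvd))
          · have : d + 2 ≤ e := by omega
            exact hrec e this heodd hee hdvd
        · intro hall e hde heodd hee hdvd
          exact hall e (by omega) heodd hee hdvd
    · rw [dif_neg h]
      apply iff_of_true rfl
      intro e hde _ hee _
      exact h (by nlinarith)

-- A's and B's primality tests agree on every integer ≥ 2
theorem pv_prime_eq (j : Int) (hj : 2 ≤ j) : is_prime j = is_prime_fast j := by
  by_cases h2 : (2 : Int) ∣ j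
  · have hm : (PySem.Int.mod j 2 == 0) = true := (pv_mod_eq_zero_iff j 2).mpr h2
    unfold is_prime_fast
    rw [if_pos hm]
    by_cases hj2 : j = 2
    · subst hj2
      have ht : is_prime 2 = true :=
        (pv_is_prime_iff 2 le_rfl).mpr (fun e he2 hee _ => absurd hee (by nlinarith))
      rw [ht]; rfl
    · have hb : (j == 2) = false := by simp [hj2]
      rw [hb, Bool.eq_false_iff, Ne, pv_is_prime_iff j hj]
      intro hall
      exact hall 2 le_rfl (by omega) h2
  · have hm : (PySem.Int.mod j 2 == 0) = false := by
      rw [Bool.eq_false_iff]; intro h; exact h2 ((pv_mod_eq_zero_iff _ _).mp h)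
    unfold is_prime_fast
    rw [hm]
    simp only [Bool.false_eq_true, if_false]
    rw [Bool.eq_iff_iff, pv_is_prime_iff j hj,
        pv_trialOdd_iff j (j + 3 - 3).toNat 3 rfl (by omega) (by omega)]
    have hjodd : j % 2 = 1 := by omega
    constructor
    · intro h e he3 _ hee
      exact h e (by omega) hee
    · intro h e he2 hee hdvd
      rcases Int.even_or_odd e with ⟨t, ht⟩ | ⟨t, ht⟩
      · exact h2 (dvd_trans ⟨t, by omega⟩ hdvd)
      · exact h e (by omega) (by omega) hee hdvd

-- A's prime filter over range(1, n+1) is B's primes_upto n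
theorem pv_primes_eq (n : Int) :
    (PySem.List.pyRange 1 (n + 1) 1).filter is_prime = primes_upto n := by
  unfold primes_upto
  rw [PySem.List.foldl_append_if_eq_filter]
  simp only [List.nil_append]
  by_cases hn : n ≤ 0
  · rw [PySem.List.pyRange_one_eq_nil (by omega : n + 1 ≤ 1),
        PySem.List.pyRange_one_eq_nil (by omega : n + 1 ≤ 2)]
    rfl
  · rw [PySem.List.pyRange_one_cons (by omega : (1:Int) < n + 1), List.filter_cons]
    have h1 : is_prime 1 = false := by norm_num [is_prime]
    simp only [h1, Bool.false_eq_true, if_false]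
    apply List.filter_congr
    intro j hj
    rw [PySem.List.mem_pyRange_one] at hj
    exact pv_prime_eq j (by omega)

theorem pv_evens_range_nil (n : Int) (hn : n ≤ 1) : PySem.List.pyRange 2 (n + 1) 2 = [] := by
  rw [PySem.List.pyRange_of_pos 2 (n + 1) (by norm_num : (0:Int) < 2),
      if_neg (by omega : ¬ (2 : Int) < n + 1)]
  rfl

theorem pv_flatMap_const_nil {α β : Type} (l : List α) :
    l.flatMap (fun _ => ([] : List β)) = [] := by
  induction l with
  | nil => rfl
  | cons hd tl ih => simp [ih]

-- ===== VERDICT (by name: the statement is the Claim_ definition above) =====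
theorem generate_pins_spec : Claim_equal_generate_pins := by
  intro fu su tu _
  unfold Spec_generate_pins generate_pins generate_pins_alt
  simp only [PySem.List.foldl_append_if, pv_foldl_append_if_flat, List.nil_append]
  rw [pv_filter_evens fu, pv_primes_eq su]
  simp only [pv_filter_evens tu]
  by_cases hc : (decide (fu ≤ 1) || decide (tu ≤ 1)) = true
  · rw [if_pos hc]
    rcases Bool.or_eq_true_iff.mp hc with hi | hk
    · rw [pv_evens_range_nil fu (by simpa using hi)]; rfl
    · rw [pv_evens_range_nil tu (by simpa using hk)]
      simp only [List.map_nil, pv_flatMap_const_nil]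
  · rw [if_neg hc]
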